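-- pv_equiv track=rewrite | github.com/NeuralEnsemble/elephant | elephant/asset.py | synchronous_events_no_overlap
-- ===== SOURCE A (Python) =====
-- def _remove_empty_events(sse):
--     """
--     Given a sequence of synchronous events (SSE) `sse` consisting of a pool of
--     pixel positions and associated synchronous events (see below), returns a
--     copy of `sse` where all empty events have been removed.
--
--     `sse` must be provided as a dictionary of type
--
--     .. centered:: {(i1, j1): S1, (i2, j2): S2, ..., (iK, jK): SK},
--
--     where each `i`, `j` is an integer and each `S` is a set of neuron IDs.
--
--     Parameters
--     ----------
--     sse : dict
--         A dictionary of pixel positions `(i, j)` as keys, and sets `S` of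
--         synchronous events as values (see above).
--
--     Returns
--     -------
--     sse_new : dict
--         A copy of `sse` where all empty events have been removed.
--
--     """
--     sse_new = sse.copy()
--     for pixel, link in sse.items():
--         if link == set([]):
--             del sse_new[pixel]
--
--     return sse_new
--
-- def synchronous_events_no_overlap(sse1, sse2):
--     """
--     Given two sequences of synchronous events (SSEs) `sse1` and `sse2`, each
--     consisting of a pool of pixel positions and associated synchronous events
--     (see below), determines whether `sse1` and `sse2` are disjoint.
--
--     Two SSEs are disjoint if they don't share pixels, or if the events
--     associated to common pixels are disjoint.
--
--     Both `sse1` and `sse2` must be provided as dictionaries of the type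
--
--     .. centered:: {(i1, j1): S1, (i2, j2): S2, ..., (iK, jK): SK},
--
--     where each `i`, `j` is an integer and each `S` is a set of neuron IDs.
--
--     Parameters
--     ----------
--     sse1, sse2 : dict
--         Dictionaries of pixel positions `(i, j)` as keys and sets `S` of
--         synchronous events as values.
--
--     Returns
--     -------
--     bool
--         True if `sse1` is disjoint from `sse2`.
--
--     See Also
--     --------
--     ASSET.extract_synchronous_events : extract SSEs from given spike trains
--
--     """
--     # Remove empty links from sse11 and sse22, if any
--     sse11 = _remove_empty_events(sse1)
--     sse22 = _remove_empty_events(sse2)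
--
--     # If both SSEs are empty, return False (we consider them equal)
--     if sse11 == {} and sse22 == {}:
--         return False
--
--     common_pixels = set(sse11.keys()).intersection(set(sse22.keys()))
--     if common_pixels == set([]):
--         return True
--     elif all(sse11[p].isdisjoint(sse22[p]) for p in common_pixels):
--         return True
--     else:
--         return False
-- ===== SOURCE B (Python) =====
-- def synchronous_events_no_overlap(sse1, sse2):
--     flat1 = {(p, n) for p, s in sse1.items() for n in s}
--     flat2 = {(p, n) for p, s in sse2.items() for n in s}
--     if not flat1 and not flat2:
--         return False
--     return flat1.isdisjoint(flat2)
-- ===== Notes on version B (the rewrite author's own statement) =====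
-- stated objective: simpler
-- what changed: Replaces the empty-event removal pass, key-set intersection and per-common-pixel disjointness loop with one flattened set of (pixel, neuron) pairs per input and a single isdisjoint test (plus the both-empty -> False guard).
import Mathlib
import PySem

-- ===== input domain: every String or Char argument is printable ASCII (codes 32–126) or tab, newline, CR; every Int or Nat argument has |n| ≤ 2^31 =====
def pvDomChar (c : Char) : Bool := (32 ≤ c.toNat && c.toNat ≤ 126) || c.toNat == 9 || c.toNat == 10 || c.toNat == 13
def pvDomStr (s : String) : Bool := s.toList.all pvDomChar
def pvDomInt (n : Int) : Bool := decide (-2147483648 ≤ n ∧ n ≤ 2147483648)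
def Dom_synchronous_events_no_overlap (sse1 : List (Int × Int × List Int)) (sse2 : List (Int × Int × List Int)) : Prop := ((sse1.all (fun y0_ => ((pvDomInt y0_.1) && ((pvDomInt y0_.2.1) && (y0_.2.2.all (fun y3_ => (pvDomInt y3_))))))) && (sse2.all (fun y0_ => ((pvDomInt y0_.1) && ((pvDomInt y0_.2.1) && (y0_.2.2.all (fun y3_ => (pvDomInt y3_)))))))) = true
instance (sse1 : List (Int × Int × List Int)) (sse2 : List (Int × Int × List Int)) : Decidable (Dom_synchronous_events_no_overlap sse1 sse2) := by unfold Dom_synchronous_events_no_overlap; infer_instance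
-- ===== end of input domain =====

-- B replaces A's empty-event removal pass, key-set intersection and per-common-pixel
-- disjointness loop by one flattened (pixel, neuron) pair set per input and a single
-- isdisjoint test (keeping the both-empty -> False case); objective: simpler.

-- ===== PORT A =====
-- del sse_new[pixel]: remove the entry with that pixel key (unique under Pre_)
def pvEraseKey (d : List (Int × Int × List Int)) (p : Int × Int) : List (Int × Int × List Int) :=
  d.filter (fun x => !((x.1, x.2.1) == p))

-- _remove_empty_events: sse_new = sse.copy(); for pixel, link in sse.items():
--   if link == set([]): del sse_new[pixel]
def removeEmptyEvents (sse : List (Int × Int × List Int)) : List (Int × Int × List Int) :=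
  sse.foldl (fun acc e => if e.2.2 = [] then pvEraseKey acc (e.1, e.2.1) else acc) sse

-- the dict's key list (the pixel (i, j) of each entry)
def pvKeys (sse : List (Int × Int × List Int)) : List (Int × Int) :=
  sse.map (fun e => (e.1, e.2.1))

-- sse[p]: dict lookup; the key is always present where A calls this (p is a common pixel)
def pvGet (sse : List (Int × Int × List Int)) (p : Int × Int) : List Int :=
  match sse.find? (fun e => (e.1, e.2.1) == p) with
  | some e => e.2.2
  | none   => []

def synchronous_events_no_overlap (sse1 : List (Int × Int × List Int)) (sse2 : List (Int × Int × List Int)) : Bool :=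
  let sse11 := removeEmptyEvents sse1
  let sse22 := removeEmptyEvents sse2
  -- if both SSEs are empty, return False
  if sse11 = [] ∧ sse22 = [] then false
  else
    -- common_pixels = set(sse11.keys()).intersection(set(sse22.keys()))
    let common := PySem.Set.inter (PySem.Set.ofList (pvKeys sse11)) (PySem.Set.ofList (pvKeys sse22))
    if common = [] then true
    -- all(sse11[p].isdisjoint(sse22[p]) for p in common_pixels): order-independent over the set
    else if common.all (fun p => PySem.Set.isdisjoint (pvGet sse11 p) (pvGet sse22 p)) then true
    else false

-- ===== PORT B =====
-- {(p, n) for p, s in sse.items() for n in s}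
def pvFlatPairs (sse : List (Int × Int × List Int)) : PySem.Set ((Int × Int) × Int) :=
  PySem.Set.ofList (sse.flatMap (fun e => e.2.2.map (fun n => ((e.1, e.2.1), n))))

def synchronous_events_no_overlap_alt (sse1 : List (Int × Int × List Int)) (sse2 : List (Int × Int × List Int)) : Bool :=
  let flat1 := pvFlatPairs sse1
  let flat2 := pvFlatPairs sse2
  if flat1 = [] ∧ flat2 = [] then false
  else PySem.Set.isdisjoint flat1 flat2

-- ===== PRECONDITION & SPEC =====
-- Pre_ excludes association lists with duplicate pixel keys: the Python functions take
-- dicts, which cannot hold duplicate keys, so such lists correspond to no Python input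
-- (a dict conversion collapses them arbitrarily to the last value per key).
def Pre_synchronous_events_no_overlap (sse1 : List (Int × Int × List Int)) (sse2 : List (Int × Int × List Int)) : Prop :=
  (pvKeys sse1).Nodup ∧ (pvKeys sse2).Nodup
instance (sse1 : List (Int × Int × List Int)) (sse2 : List (Int × Int × List Int)) : Decidable (Pre_synchronous_events_no_overlap sse1 sse2) := by unfold Pre_synchronous_events_no_overlap; infer_instance

def pvWitness_synchronous_events_no_overlap : (List (Int × Int × List Int)) × (List (Int × Int × List Int)) :=
  ([(0, 0, [1, 2]), (0, 1, [])], [(0, 0, [3]), (1, 1, [2])])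

def Spec_synchronous_events_no_overlap (sse1 : List (Int × Int × List Int)) (sse2 : List (Int × Int × List Int)) (out : Bool) : Prop := out = synchronous_events_no_overlap_alt sse1 sse2
instance (sse1 : List (Int × Int × List Int)) (sse2 : List (Int × Int × List Int)) (out : Bool) : Decidable (Spec_synchronous_events_no_overlap sse1 sse2 out) := by unfold Spec_synchronous_events_no_overlap; infer_instance

-- ===== CLAIM (what is proved, stated in full; the proofs are below) =====
def Claim_equal_synchronous_events_no_overlap : Prop := ∀ (sse1 : List (Int × Int × List Int)) (sse2 : List (Int × Int × List Int)), Dom_synchronous_events_no_overlap sse1 sse2 → Pre_synchronous_events_no_overlap sse1 sse2 → Spec_synchronous_events_no_overlap sse1 sse2 (synchronous_events_no_overlap sse1 sse2)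

-- ===== LEMMAS AND PROOFS =====

-- the foldl of conditional erasures is one filter
theorem foldl_erase_eq_filter (l acc : List (Int × Int × List Int)) :
    l.foldl (fun acc e => if e.2.2 = [] then pvEraseKey acc (e.1, e.2.1) else acc) acc
      = acc.filter (fun x => l.all (fun e => !decide (e.2.2 = []) || !((x.1, x.2.1) == (e.1, e.2.1)))) := by
  induction l generalizing acc with
  | nil => simp
  | cons a t ih =>
    simp only [List.foldl_cons, List.all_cons]
    by_cases ha : a.2.2 = []
    · rw [if_pos ha, ih, pvEraseKey, List.filter_filter]
      apply List.filter_congr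
      intro x _
      simp [ha, Bool.and_comm]
    · rw [if_neg ha, ih]
      apply List.filter_congr
      intro x _
      simp [ha]

-- under Nodup keys the big filter predicate is just "the value set is nonempty"
theorem removeEmptyEvents_eq_filter (sse : List (Int × Int × List Int))
    (h : (pvKeys sse).Nodup) :
    removeEmptyEvents sse = sse.filter (fun e => !decide (e.2.2 = [])) := by
  rw [removeEmptyEvents, foldl_erase_eq_filter]
  apply List.filter_congr
  intro x hx
  by_cases hv : x.2.2 = []
  · simp only [hv, decide_true, Bool.not_true]
    rw [List.all_eq_false]
    exact ⟨x, hx, by simp [hv]⟩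
  · simp only [hv, decide_false, Bool.not_false]
    rw [List.all_eq_true]
    intro e he
    by_cases hk : (x.1, x.2.1) = (e.1, e.2.1)
    · have : x = e := List.inj_on_of_nodup_map h hx he (by simpa [pvKeys] using hk)
      simp [← this, hv]
    · simp [hk]

-- membership in the flattened pair set
theorem mem_flatPairs (sse : List (Int × Int × List Int)) (p : Int × Int) (n : Int) :
    (p, n) ∈ pvFlatPairs sse ↔ ∃ e ∈ sse, (e.1, e.2.1) = p ∧ n ∈ e.2.2 := by
  rw [pvFlatPairs, PySem.Set.mem_ofList]
  simp only [List.mem_flatMap, List.mem_map]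
  constructor
  · rintro ⟨e, he, n', hn', heq⟩
    exact ⟨e, he, by simpa using congrArg Prod.fst heq, by
      have : n' = n := by simpa using congrArg Prod.snd heq
      exact this ▸ hn'⟩
  · rintro ⟨e, he, hp, hn⟩
    exact ⟨e, he, n, hn, by simp [hp]⟩

-- the filtered dict is empty iff the flattened pair set is empty
theorem filter_nil_iff_flat_nil (sse : List (Int × Int × List Int)) :
    sse.filter (fun e => !decide (e.2.2 = [])) = [] ↔ pvFlatPairs sse = [] := by
  constructor
  · intro h
    rw [List.eq_nil_iff_forall_not_mem]
    rintro ⟨p, n⟩ hx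
    rw [mem_flatPairs] at hx
    obtain ⟨e, he, _, hn⟩ := hx
    have := List.filter_eq_nil_iff.mp h e he
    simp at this
    simp [this] at hn
  · intro h
    rw [List.filter_eq_nil_iff]
    intro e he
    by_contra hne
    simp only [Bool.not_eq_true', decide_eq_false_iff_not] at hne
    obtain ⟨n, hn⟩ := List.exists_mem_of_ne_nil _ hne
    have : ((e.1, e.2.1), n) ∈ pvFlatPairs sse :=
      (mem_flatPairs sse _ n).mpr ⟨e, he, rfl, hn⟩
    simp [h] at this

-- find? on a key-nodup list returns the entry itself
theorem find?_of_mem_nodup (l : List (Int × Int × List Int)) (e : Int × Int × List Int)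
    (h : (pvKeys l).Nodup) (he : e ∈ l) :
    l.find? (fun x => (x.1, x.2.1) == (e.1, e.2.1)) = some e := by
  induction l with
  | nil => cases he
  | cons a t ih =>
    have h' := h
    rw [show pvKeys (a :: t) = (a.1, a.2.1) :: pvKeys t from rfl, List.nodup_cons] at h'
    rcases List.mem_cons.mp he with rfl | he'
    · simp
    · have hka : ((a.1, a.2.1) == (e.1, e.2.1)) = false := by
        rw [beq_eq_false_iff_ne]
        intro hk
        exact h'.1 (hk ▸ List.mem_map.mpr ⟨e, he', rfl⟩)
      rw [List.find?_cons_of_neg (by simp [hka])]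
      exact ih h'.2 he'

theorem pvGet_of_mem (l : List (Int × Int × List Int)) (e : Int × Int × List Int)
    (h : (pvKeys l).Nodup) (he : e ∈ l) :
    pvGet l (e.1, e.2.1) = e.2.2 := by
  rw [pvGet, find?_of_mem_nodup l e h he]

theorem synchronous_events_no_overlap_spec : Claim_equal_synchronous_events_no_overlap := by
  intro sse1 sse2 _ hpre
  obtain ⟨h1, h2⟩ := hpre
  unfold Spec_synchronous_events_no_overlap synchronous_events_no_overlap synchronous_events_no_overlap_alt
  rw [removeEmptyEvents_eq_filter sse1 h1, removeEmptyEvents_eq_filter sse2 h2]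
  set s11 := sse1.filter (fun e => !decide (e.2.2 = [])) with hs11
  set s22 := sse2.filter (fun e => !decide (e.2.2 = [])) with hs22
  have h11n : (pvKeys s11).Nodup := by
    refine List.Nodup.sublist ?_ h1
    exact List.Sublist.map _ List.filter_sublist
  have h22n : (pvKeys s22).Nodup := by
    refine List.Nodup.sublist ?_ h2
    exact List.Sublist.map _ List.filter_sublist
  -- the two emptiness guards agree
  have g1 : s11 = [] ↔ pvFlatPairs sse1 = [] := filter_nil_iff_flat_nil sse1
  have g2 : s22 = [] ↔ pvFlatPairs sse2 = [] := filter_nil_iff_flat_nil sse2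
  by_cases hboth : s11 = [] ∧ s22 = []
  · rw [if_pos hboth, if_pos ⟨g1.mp hboth.1, g2.mp hboth.2⟩]
  · rw [if_neg hboth]
    conv_rhs => rw [if_neg (show ¬(pvFlatPairs sse1 = [] ∧ pvFlatPairs sse2 = []) by
      rw [← g1, ← g2]; exact hboth)]
    -- membership of s11/s22 vs sse1/sse2
    have mem11 : ∀ e, e ∈ s11 ↔ e ∈ sse1 ∧ e.2.2 ≠ [] := by
      intro e; rw [hs11, List.mem_filter]; simp
    have mem22 : ∀ e, e ∈ s22 ↔ e ∈ sse2 ∧ e.2.2 ≠ [] := by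
      intro e; rw [hs22, List.mem_filter]; simp
    -- A's inner condition  ↔  B's pairwise disjointness
    have key : ((PySem.Set.inter (PySem.Set.ofList (pvKeys s11)) (PySem.Set.ofList (pvKeys s22)) = []) ∨
        (∀ p ∈ PySem.Set.inter (PySem.Set.ofList (pvKeys s11)) (PySem.Set.ofList (pvKeys s22)),
          PySem.Set.isdisjoint (pvGet s11 p) (pvGet s22 p) = true))
        ↔ (∀ x ∈ pvFlatPairs sse1, x ∉ pvFlatPairs sse2) := by
      constructor
      · rintro hA ⟨p, n⟩ hx1 hx2
        obtain ⟨e1, he1, hp1, hn1⟩ := (mem_flatPairs sse1 p n).mp hx1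
        obtain ⟨e2, he2, hp2, hn2⟩ := (mem_flatPairs sse2 p n).mp hx2
        have he1' : e1 ∈ s11 := (mem11 e1).mpr ⟨he1, List.ne_nil_of_mem hn1⟩
        have he2' : e2 ∈ s22 := (mem22 e2).mpr ⟨he2, List.ne_nil_of_mem hn2⟩
        have hpc : p ∈ PySem.Set.inter (PySem.Set.ofList (pvKeys s11)) (PySem.Set.ofList (pvKeys s22)) := by
          rw [PySem.Set.mem_inter, PySem.Set.mem_ofList, PySem.Set.mem_ofList]
          exact ⟨List.mem_map.mpr ⟨e1, he1', hp1⟩, List.mem_map.mpr ⟨e2, he2', hp2⟩⟩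
        rcases hA with hA | hA
        · rw [hA] at hpc; cases hpc
        · have hd := hA p hpc
          have k1 : pvGet s11 p = e1.2.2 := by rw [← hp1]; exact pvGet_of_mem s11 e1 h11n he1'
          have k2 : pvGet s22 p = e2.2.2 := by rw [← hp2]; exact pvGet_of_mem s22 e2 h22n he2'
          rw [k1, k2] at hd
          exact (PySem.Set.isdisjoint_iff _ _).mp hd n hn1 hn2
      · intro hB
        right
        intro p hpc
        rw [PySem.Set.mem_inter, PySem.Set.mem_ofList, PySem.Set.mem_ofList] at hpc
        obtain ⟨e1, he1', hp1⟩ := List.mem_map.mp hpc.1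
        obtain ⟨e2, he2', hp2⟩ := List.mem_map.mp hpc.2
        have k1 : pvGet s11 p = e1.2.2 := by rw [← hp1]; exact pvGet_of_mem s11 e1 h11n he1'
        have k2 : pvGet s22 p = e2.2.2 := by rw [← hp2]; exact pvGet_of_mem s22 e2 h22n he2'
        rw [k1, k2, PySem.Set.isdisjoint_iff]
        intro n hn1 hn2
        have hx1 : (p, n) ∈ pvFlatPairs sse1 :=
          (mem_flatPairs sse1 p n).mpr ⟨e1, ((mem11 e1).mp he1').1, hp1, hn1⟩
        have hx2 : (p, n) ∈ pvFlatPairs sse2 :=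
          (mem_flatPairs sse2 p n).mpr ⟨e2, ((mem22 e2).mp he2').1, hp2, hn2⟩
        exact hB (p, n) hx1 hx2
    rw [eq_comm, PySem.Set.isdisjoint]
    by_cases hc : PySem.Set.inter (PySem.Set.ofList (pvKeys s11)) (PySem.Set.ofList (pvKeys s22)) = []
    · rw [if_pos hc]
      have := key.mp (Or.inl hc)
      simp only [Bool.not_eq_true', List.any_eq_false]
      intro x hx
      simpa using this x hx
    · rw [if_neg hc]
      by_cases hall : (PySem.Set.inter (PySem.Set.ofList (pvKeys s11)) (PySem.Set.ofList (pvKeys s22))).all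
          (fun p => PySem.Set.isdisjoint (pvGet s11 p) (pvGet s22 p)) = true
      · rw [if_pos hall]
        have := key.mp (Or.inr (by simpa [List.all_eq_true] using hall))
        simp only [Bool.not_eq_true', List.any_eq_false]
        intro x hx
        simpa using this x hx
      · rw [if_neg hall]
        have hany : (pvFlatPairs sse1).any (fun x => PySem.Set.contains (pvFlatPairs sse2) x) = true := by
          by_contra hfalse
          have hB : ∀ x ∈ pvFlatPairs sse1, x ∉ pvFlatPairs sse2 := by
            rw [Bool.not_eq_true, List.any_eq_false] at hfalse
            intro x hx
            simpa using hfalse x hx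
          rcases key.mpr hB with h | h
          · exact hc h
          · exact hall (List.all_eq_true.mpr (fun p hp => h p hp))
        rw [hany]
        rfl
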